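-- pv_equiv track=rewrite | github.com/artem12345-png/CV_artem_aslamov | lpost_tk/app/functions/create_orders.py | get_shipment_sizes
-- ===== SOURCE A (Python) =====
-- from typing import List
--
-- def get_shipment_sizes(goods: List[dict]):
--     """Рекурсивно считает примерные размеры груза с товарами."""
--
--     # Выходим, если передан список из одного товара.
--     if len(goods) == 1:
--         return goods
--
--     full_stack, stack = list(), list()
--     for i, g in enumerate(goods, 1):
--         stack.append(g)
--
--         # Отбираем по 3 товара.
--         if i % 3 == 0:
--             full_stack.append(calc_stack_sizes(stack))
--             del stack[:]
--
--     if len(stack):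
--         full_stack.append(calc_stack_sizes(stack))
--
--     return get_shipment_sizes(full_stack)
--
-- def calc_stack_sizes(stack):
--     """Считает размеры стопки товаров."""
--
--     # Считаем максимальные размеры.
--     length = (max([e['length'] for e in stack]), 'length')
--     height = (max([e['height'] for e in stack]), 'height')
--     width = (max([e['width'] for e in stack]), 'width')
--
--     # Находим минимальное измерение.
--     min_param = min([length, height, width], key=lambda x: x[0])
--
--     key = min_param[1]
--     # Суммируем наименьшее размерение.
--     sum_param = (sum(e[key] for e in stack), key)
--
--     if key == 'length':
--         length = sum_param
--     elif key == 'width':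
--         width = sum_param
--     elif key == 'height':
--         height = sum_param
--
--     r = dict(
--         length=length[0],
--         height=height[0],
--         width=width[0]
--     )
--
--     return r
-- ===== SOURCE B (Python) =====
-- from typing import List
--
--
-- def calc_stack_sizes(stack):
--     """One pass per dimension: (max, sum) pairs, then substitute the sum on the smallest dimension."""
--     dims = {}
--     for k in ('length', 'height', 'width'):
--         vals = [e[k] for e in stack]
--         dims[k] = (max(vals), sum(vals))
--     key = min(dims, key=lambda k: dims[k][0])
--     return {k: (dims[k][1] if k == key else dims[k][0]) for k in dims}
--
--
-- def _chunks3(xs):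
--     out = []
--     while xs:
--         out.append(xs[:3])
--         xs = xs[3:]
--     return out
--
--
-- def get_shipment_sizes(goods: List[dict]):
--     """Iteratively folds the goods by generations of 3-stacks until one cargo remains."""
--     while len(goods) != 1:
--         goods = [calc_stack_sizes(chunk) for chunk in _chunks3(goods)]
--     return goods
-- ===== Notes on version B (the rewrite author's own statement) =====
-- stated objective: alternative
-- what changed: The outer reduction becomes an iterative while-loop over explicit 3-chunks instead of tail recursion, and calc_stack_sizes builds one (max, sum) table per dimension in a single keyed pass instead of three max comprehensions plus a separate sum pass.
import Mathlib
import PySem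

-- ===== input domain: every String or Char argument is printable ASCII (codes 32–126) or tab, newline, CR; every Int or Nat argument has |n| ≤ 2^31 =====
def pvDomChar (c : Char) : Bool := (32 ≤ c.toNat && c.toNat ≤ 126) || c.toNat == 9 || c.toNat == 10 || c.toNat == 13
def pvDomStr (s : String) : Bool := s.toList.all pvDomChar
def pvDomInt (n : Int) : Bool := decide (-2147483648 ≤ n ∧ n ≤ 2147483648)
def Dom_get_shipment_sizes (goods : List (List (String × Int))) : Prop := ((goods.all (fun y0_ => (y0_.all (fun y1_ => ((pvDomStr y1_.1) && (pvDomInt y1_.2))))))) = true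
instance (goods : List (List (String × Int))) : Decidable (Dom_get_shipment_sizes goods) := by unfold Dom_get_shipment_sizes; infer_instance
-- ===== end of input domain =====

-- B replaces A's tail recursion by an iterative generation loop over explicit 3-chunks and fuses
-- calc_stack_sizes' max/sum passes into one (max, sum) table per dimension (objective: alternative decomposition).

-- ===== PORT A =====

-- e[k]: Python dict lookup; on Pre_ inputs keys are present and unique, so first-match lookup is exact.
def pvGetKey (e : List (String × Int)) (k : String) : Int := (e.lookup k).getD 0

-- calc_stack_sizes from A: three max passes, Python min over the three (value, name) pairs, sum substitution.
-- max([...]) raises on an empty list; A only ever calls this on nonempty stacks, so the .getD defaults are never used.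
def calcA (stack : List (List (String × Int))) : List (String × Int) :=
  let length := ((PySem.List.max? (stack.map (fun e => pvGetKey e "length")) (fun y => y)).getD 0, "length")
  let height := ((PySem.List.max? (stack.map (fun e => pvGetKey e "height")) (fun y => y)).getD 0, "height")
  let width  := ((PySem.List.max? (stack.map (fun e => pvGetKey e "width")) (fun y => y)).getD 0, "width")
  let min_param := (PySem.List.min? [length, height, width] (fun x => x.1)).getD (0, "")
  let key := min_param.2
  let sum_param := ((stack.map (fun e => pvGetKey e key)).sum, key)
  let length := if key = "length" then sum_param else length
  let width  := if key = "width" then sum_param else width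
  let height := if key = "height" then sum_param else height
  [("length", length.1), ("height", height.1), ("width", width.1)]

-- A's 'for i, g in enumerate(goods, 1)' loop: state (full_stack, stack), 1-based counter i.
def aLoop : List (List (String × Int)) → Nat → List (List (String × Int)) → List (List (String × Int)) →
    (List (List (String × Int)) × List (List (String × Int)))
  | [], _, full, stack => (full, stack)
  | g :: rest, i, full, stack =>
    let stack' := stack ++ [g]
    if i % 3 = 0 then aLoop rest (i + 1) (full ++ [calcA stack']) []
    else aLoop rest (i + 1) full stack'

-- B-side chunker, defined before the ports because both termination proofs cite facts about it:
-- Source B's _chunks3, 'while xs: out.append(xs[:3]); xs = xs[3:]' (nonnegative slices = take/drop).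
def chunks3 (xs : List (List (String × Int))) : List (List (List (String × Int))) :=
  if h : xs = [] then []
  else xs.take 3 :: chunks3 (xs.drop 3)
termination_by xs.length
decreasing_by
  have : xs.length ≠ 0 := fun hl => h (List.eq_nil_of_length_eq_zero hl)
  simp; omega

theorem chunks3_length (xs : List (List (String × Int))) :
    (chunks3 xs).length = (xs.length + 2) / 3 := by
  induction xs using chunks3.induct with
  | case1 => simp [chunks3]
  | case2 xs h ih =>
    rw [chunks3, dif_neg h]
    have : xs.length ≠ 0 := fun hl => h (List.eq_nil_of_length_eq_zero hl)
    simp [ih]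
    omega

-- One A-generation is calcA mapped over the 3-chunks (loop invariant of aLoop).
theorem aLoop_chunks (gs : List (List (String × Int))) : ∀ (i : Nat) full stack,
    stack.length ≤ 2 → i % 3 = (stack.length + 1) % 3 →
    (if (aLoop gs i full stack).2.length ≠ 0
      then (aLoop gs i full stack).1 ++ [calcA (aLoop gs i full stack).2]
      else (aLoop gs i full stack).1)
      = full ++ (chunks3 (stack ++ gs)).map calcA := by
  induction gs with
  | nil =>
    intro i full stack hle _
    rcases stack with _ | ⟨s, t⟩
    · simp [aLoop, chunks3]
    · rw [aLoop]
      rw [List.append_nil, chunks3, dif_neg (by simp)]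
      have hlen : (s :: t).length ≤ 3 := by simp at hle ⊢; omega
      have hdrop : (s :: t).drop 3 = [] := List.drop_eq_nil_of_le hlen
      have htake : (s :: t).take 3 = s :: t := List.take_of_length_le hlen
      rw [hdrop, htake, chunks3]
      simp
  | cons g rest ih =>
    intro i full stack hle hinv
    rw [aLoop]
    by_cases h3 : i % 3 = 0
    · -- a full stack of 3 is emitted: stack.length must be 2
      have hs2 : stack.length = 2 := by omega
      rw [if_pos h3]
      have ih' := ih (i + 1) (full ++ [calcA (stack ++ [g])]) [] (by simp) (by simp; omega)
      simp only [List.nil_append] at ih'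
      rw [ih']
      have hlen : (stack ++ [g]).length = 3 := by simp [hs2]
      have hc : chunks3 (stack ++ g :: rest) = (stack ++ [g]) :: chunks3 rest := by
        rw [chunks3, dif_neg (by simp)]
        rw [show stack ++ g :: rest = (stack ++ [g]) ++ rest by simp]
        rw [List.take_append_of_le_length (by omega), List.take_of_length_le (by omega),
            List.drop_append_of_le_length (by omega), List.drop_eq_nil_of_le (by omega)]
        simp
      rw [hc]
      simp
    · -- the partial stack grows by one
      rw [if_neg h3]
      have ih' := ih (i + 1) full (stack ++ [g]) (by simp; omega) (by simp; omega)
      simp only [List.append_assoc, List.singleton_append] at ih'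
      exact ih'

-- cited by both ports' termination proofs: one generation strictly shrinks a list of length ≥ 2
theorem chunks3_map_lt (goods : List (List (String × Int)))
    (f : List (List (String × Int)) → List (String × Int))
    (h1 : ¬goods.length = 1) (h0 : goods ≠ []) :
    ((chunks3 goods).map f).length < goods.length := by
  have : goods.length ≠ 0 := fun hl => h0 (List.eq_nil_of_length_eq_zero hl)
  simp [chunks3_length]
  omega

-- get_shipment_sizes, A's recursion. On goods = [] Python A recurses forever (RecursionError):
-- that input is outside Pre_; the '[]' branch only makes the Lean recursion total.
def get_shipment_sizes (goods : List (List (String × Int))) : List (List (String × Int)) :=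
  if goods.length = 1 then goods
  else if h0 : goods = [] then []
  else
    let p := aLoop goods 1 [] []
    let full := if p.2.length ≠ 0 then p.1 ++ [calcA p.2] else p.1
    get_shipment_sizes full
termination_by goods.length
decreasing_by
  rename_i h1
  have h := aLoop_chunks goods 1 [] [] (by simp) (by simp)
  simp only [List.nil_append] at h
  simp only [dite_eq_ite] at *
  rw [h]
  exact chunks3_map_lt goods calcA h1 h0

-- ===== PORT B =====

-- calc_stack_sizes from Source B: one (max, sum) table per dimension, Python min over the keys, substitution by comprehension.
def calcB (stack : List (List (String × Int))) : List (String × Int) :=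
  let dims := ["length", "height", "width"].map (fun k =>
    let vals := stack.map (fun e => pvGetKey e k)
    (k, ((PySem.List.max? vals (fun y => y)).getD 0, vals.sum)))
  let key := ((PySem.List.min? dims (fun kv => kv.2.1)).getD ("", (0, 0))).1
  dims.map (fun kv => (kv.1, if kv.1 = key then kv.2.2 else kv.2.1))

-- Source B's 'while len(goods) != 1' generation loop. On goods = [] Python B loops forever: outside Pre_;
-- the '[]' branch only makes the Lean recursion total.
def get_shipment_sizes_alt (goods : List (List (String × Int))) : List (List (String × Int)) :=
  if goods.length = 1 then goods
  else if h0 : goods = [] then []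
  else get_shipment_sizes_alt ((chunks3 goods).map calcB)
termination_by goods.length
decreasing_by
  rename_i h1
  exact chunks3_map_lt goods calcB h1 h0

-- ===== PRECONDITION & SPEC =====
-- Pre_ excludes: the empty list (A recurses forever, RecursionError); for length ≥ 2, goods whose dicts
-- miss one of the three dimension keys (A raises KeyError); and duplicate-key association lists, which no
-- Python dict can represent (first-match assoc lookup vs last-wins dict construction would disagree).
def Pre_get_shipment_sizes (goods : List (List (String × Int))) : Prop :=
  goods ≠ [] ∧ (∀ d ∈ goods, (d.map Prod.fst).Nodup) ∧
    (goods.length = 1 ∨ ∀ d ∈ goods,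
      "length" ∈ d.map Prod.fst ∧ "height" ∈ d.map Prod.fst ∧ "width" ∈ d.map Prod.fst)

instance (goods : List (List (String × Int))) : Decidable (Pre_get_shipment_sizes goods) := by
  unfold Pre_get_shipment_sizes; infer_instance

def pvWitness_get_shipment_sizes : (List (List (String × Int))) :=
  [[("length", 3), ("height", 2), ("width", 5)], [("length", 1), ("height", 4), ("width", 2)],
   [("length", 2), ("height", 2), ("width", 2)], [("length", 6), ("height", 1), ("width", 3)]]

def Spec_get_shipment_sizes (goods : List (List (String × Int))) (out : List (List (String × Int))) : Prop := out = get_shipment_sizes_alt goods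
instance (goods : List (List (String × Int))) (out : List (List (String × Int))) : Decidable (Spec_get_shipment_sizes goods out) := by unfold Spec_get_shipment_sizes; infer_instance

-- ===== CLAIM (what is proved, stated in full; the proofs are below) =====
def Claim_equal_get_shipment_sizes : Prop := ∀ (goods : List (List (String × Int))), Dom_get_shipment_sizes goods → Pre_get_shipment_sizes goods → Spec_get_shipment_sizes goods (get_shipment_sizes goods)

-- ===== LEMMAS AND PROOFS =====

-- Python's min over a 3-element list with a key (first minimum wins), written as nested ifs
theorem min3 {α κ : Type} [LT κ] [DecidableLT κ] (a b c : α) (key : α → κ) :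
    PySem.List.min? [a, b, c] key
      = some (if key c < key (if key b < key a then b else a) then c
              else if key b < key a then b else a) := by
  simp only [PySem.List.min?, List.foldl_cons, List.foldl_nil]
  by_cases h1 : key b < key a <;> by_cases h2 : key c < key (if key b < key a then b else a) <;>
    simp_all

-- the two calc_stack_sizes implementations agree on every stack
set_option maxRecDepth 8192 in
theorem calc_eq (stack : List (List (String × Int))) : calcA stack = calcB stack := by
  simp only [calcA, calcB, List.map, min3, Option.getD_some]
  split_ifs <;> simp_all

-- the ports agree on EVERY input (the guards coincide; one A-generation = one B-generation)
theorem ports_eq (goods : List (List (String × Int))) :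
    get_shipment_sizes goods = get_shipment_sizes_alt goods := by
  rw [get_shipment_sizes, get_shipment_sizes_alt]
  by_cases h1 : goods.length = 1
  · simp [h1]
  · rw [if_neg h1, if_neg h1]
    by_cases h0 : goods = []
    · simp [h0]
    · rw [dif_neg h0, dif_neg h0]
      have h := aLoop_chunks goods 1 [] [] (by simp) (by simp)
      simp only [List.nil_append] at h
      simp only [h]
      have hmap : (chunks3 goods).map calcA = (chunks3 goods).map calcB :=
        List.map_congr_left (fun x _ => calc_eq x)
      rw [hmap]
      exact ports_eq ((chunks3 goods).map calcB)
termination_by goods.length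
decreasing_by
  exact chunks3_map_lt goods calcB h1 h0

-- ===== VERDICT (by name: the statement is the Claim_ definition above) =====
theorem get_shipment_sizes_spec : Claim_equal_get_shipment_sizes := by
  intro goods _ _
  unfold Spec_get_shipment_sizes
  exact ports_eq goods
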